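-- pv_equiv track=rewrite | github.com/weiyz23/WWW26-GlassMiner | webpage_crawler/src/2_as_informed_discovery.py | generate_one_asn_slice
-- ===== SOURCE A (Python) =====
-- def generate_one_asn_slice(dict_queue_asn_rank: dict, slice_size=20):
--     """
--     Generate the task for one slice of ASNs.
--     Remove the selected ASNs from the dict_asn_rank.
--     """
--     # Split the dict_asn_rank into slices
--     dict_as_slice = {}
--     for asn, info in dict_queue_asn_rank.items():
--         if len(dict_as_slice) >= slice_size:
--             break
--         dict_as_slice[asn] = info
--     for asn in dict_as_slice.keys():
--         if asn in dict_queue_asn_rank: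
--             del dict_queue_asn_rank[asn]
--     return dict_as_slice
-- ===== SOURCE B (Python) =====
-- def generate_one_asn_slice(dict_queue_asn_rank: dict, slice_size=20):
--     """Partition the entries once: keep the first slice_size as the result,
--     rebuild the remainder in place."""
--     n = max(slice_size, 0)
--     items = list(dict_queue_asn_rank.items())
--     head = items[:n]
--     dict_queue_asn_rank.clear()
--     dict_queue_asn_rank.update(items[n:])
--     return dict(head)
-- ===== Notes on version B (the rewrite author's own statement) =====
-- stated objective: simpler
-- what changed: Replaces the break-loop that copies entries plus a second key-by-key deletion loop with a single partition of the materialized item list (head/tail slices), rebuilding the source dict from the tail with clear()+update() instead of deleting keys one at a time.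
import Mathlib
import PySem

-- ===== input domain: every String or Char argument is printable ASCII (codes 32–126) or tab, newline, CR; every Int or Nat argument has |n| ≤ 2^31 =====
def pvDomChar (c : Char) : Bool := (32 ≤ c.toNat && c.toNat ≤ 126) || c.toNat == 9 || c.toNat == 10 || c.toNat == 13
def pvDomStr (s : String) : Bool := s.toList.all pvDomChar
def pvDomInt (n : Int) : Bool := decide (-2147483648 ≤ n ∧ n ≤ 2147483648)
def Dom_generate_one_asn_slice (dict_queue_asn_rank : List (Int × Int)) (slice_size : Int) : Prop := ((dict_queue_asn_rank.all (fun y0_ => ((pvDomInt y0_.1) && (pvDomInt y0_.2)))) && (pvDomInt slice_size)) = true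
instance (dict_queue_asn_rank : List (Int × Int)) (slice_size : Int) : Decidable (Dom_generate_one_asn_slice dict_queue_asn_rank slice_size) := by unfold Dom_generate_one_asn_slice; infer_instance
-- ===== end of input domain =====

-- ===== PORT A =====
-- B differs from A only in HOW the first slice_size entries are kept/removed; the return
-- value is identical. Both Pythons mutate the argument dict in place (A deletes the selected
-- keys one by one, B rebuilds the remainder via clear()+update()); the net mutation is the
-- same and the equivalence proved here is about the RETURN value.

-- first loop of A: copy entries until len(dict_as_slice) >= slice_size, then break
def pvSliceLoopA (items : List (Int × Int)) (acc : PySem.Dict Int Int) (k : Int) : PySem.Dict Int Int :=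
  match items with
  | [] => acc
  | (asn, info) :: rest =>
    if k ≤ (acc.size : Int) then acc
    else pvSliceLoopA rest (acc.insert asn info) k

-- (A's second loop deletes the selected keys from the argument dict; it does not touch the return value)
def generate_one_asn_slice (dict_queue_asn_rank : List (Int × Int)) (slice_size : Int) : List (Int × Int) :=
  (pvSliceLoopA dict_queue_asn_rank PySem.Dict.empty slice_size).items

-- ===== PORT B =====
def generate_one_asn_slice_alt (dict_queue_asn_rank : List (Int × Int)) (slice_size : Int) : List (Int × Int) :=
  let n : Int := max slice_size 0
  let head := PySem.List.slice dict_queue_asn_rank none (some n)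
  (PySem.Dict.ofList head).items

-- ===== PRECONDITION & SPEC =====
-- Pre_ excludes association lists with duplicate keys: such a list does not represent any
-- Python dict (the actual argument type of A), so no behaviour of A exists for it.
def Pre_generate_one_asn_slice (dict_queue_asn_rank : List (Int × Int)) (slice_size : Int) : Prop :=
  (dict_queue_asn_rank.map Prod.fst).Nodup

instance (dict_queue_asn_rank : List (Int × Int)) (slice_size : Int) : Decidable (Pre_generate_one_asn_slice dict_queue_asn_rank slice_size) := by unfold Pre_generate_one_asn_slice; infer_instance

def pvWitness_generate_one_asn_slice : (List (Int × Int)) × Int := ([(1, 10), (2, 20), (3, 30)], 2)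

def Spec_generate_one_asn_slice (dict_queue_asn_rank : List (Int × Int)) (slice_size : Int) (out : List (Int × Int)) : Prop := out = generate_one_asn_slice_alt dict_queue_asn_rank slice_size
instance (dict_queue_asn_rank : List (Int × Int)) (slice_size : Int) (out : List (Int × Int)) : Decidable (Spec_generate_one_asn_slice dict_queue_asn_rank slice_size out) := by unfold Spec_generate_one_asn_slice; infer_instance

-- ===== CLAIM (what is proved, stated in full; the proofs are below) =====
def Claim_equal_generate_one_asn_slice : Prop := ∀ (dict_queue_asn_rank : List (Int × Int)) (slice_size : Int), Dom_generate_one_asn_slice dict_queue_asn_rank slice_size → Pre_generate_one_asn_slice dict_queue_asn_rank slice_size → Spec_generate_one_asn_slice dict_queue_asn_rank slice_size (generate_one_asn_slice dict_queue_asn_rank slice_size)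

-- ===== LEMMAS AND PROOFS =====

-- A's break-loop, run from an accumulator whose keys are disjoint from the (key-nodup)
-- remaining items, appends exactly the first (k - size) remaining items.
theorem pvSliceLoopA_items (items : List (Int × Int)) :
    ∀ (acc : PySem.Dict Int Int) (k : Int),
    (items.map Prod.fst).Nodup →
    (∀ a ∈ items.map Prod.fst, acc.contains a = false) →
    (pvSliceLoopA items acc k).items = acc.items ++ items.take (k - acc.size).toNat := by
  induction items with
  | nil => intro acc k _ _; simp [pvSliceLoopA]
  | cons p rest ih =>
    intro acc k hnd hdis
    obtain ⟨asn, info⟩ := p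
    simp only [List.map_cons, List.nodup_cons] at hnd
    by_cases hk : k ≤ (acc.size : Int)
    · have : (k - (acc.size : Int)).toNat = 0 := by omega
      simp [pvSliceLoopA, hk, this]
    · have hfresh : acc.contains asn = false := hdis asn (by simp)
      have hit : (acc.insert asn info).items = acc.items ++ [(asn, info)] := by
        simp [PySem.Dict.items_insert, hfresh]
      have hsize : (acc.insert asn info).size = acc.size + 1 := by
        simp [PySem.Dict.size, hit]
      have hdis' : ∀ a ∈ rest.map Prod.fst, (acc.insert asn info).contains a = false := by
        intro a ha
        have hne : a ≠ asn := by
          intro h; exact hnd.1 (h ▸ ha)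
        have := hdis a (by simp; right; simpa using ha)
        simp [PySem.Dict.contains_insert, this, hne]
      rw [pvSliceLoopA]
      simp only [hk, if_false]
      rw [ih (acc.insert asn info) k hnd.2 hdis', hit, hsize]
      have h1 : (k - (acc.size : Int)).toNat = (k - ((acc.size : Int) + 1)).toNat + 1 := by omega
      simp [h1, List.take_succ_cons]

-- dict(l) over a list with pairwise-distinct keys has exactly l as its items
theorem pvOfList_items (l : List (Int × Int)) (h : (l.map Prod.fst).Nodup) :
    (PySem.Dict.ofList l).items = l := by
  have := PySem.Dict.items_foldl_insert_fresh (l := l) (k := Prod.fst) (v := Prod.snd)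
    (d := PySem.Dict.empty) (by intro a _; simp [PySem.Dict.contains_empty]) h
  simpa [PySem.Dict.ofList] using this

-- ===== VERDICT (by name: the statement is the Claim_ definition above) =====
theorem generate_one_asn_slice_spec : Claim_equal_generate_one_asn_slice := by
  intro d k _ hpre
  unfold Spec_generate_one_asn_slice generate_one_asn_slice generate_one_asn_slice_alt
  have hA := pvSliceLoopA_items d PySem.Dict.empty k hpre
    (by intro a _; simp [PySem.Dict.contains_empty])
  have hslice : PySem.List.slice d none (some (max k 0)) = d.take (max k 0).toNat :=
    PySem.List.slice_to d (le_max_right k 0)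
  have hhead : ((d.take (max k 0).toNat).map Prod.fst).Nodup := by
    rw [List.map_take]; exact hpre.sublist ((d.map Prod.fst).take_sublist _)
  have htk : (k - (PySem.Dict.empty (κ := Int) (ν := Int)).size).toNat = (max k 0).toNat := by
    simp [PySem.Dict.size_empty]; omega
  rw [hA, htk]
  simp only [hslice]
  rw [pvOfList_items _ hhead]
  simp [PySem.Dict.empty]
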